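-- pv_equiv track=rewrite | github.com/Brinkley97/applied_data_structures_and_algorithms | class/fall_24/hw/seat_booking_script.py | get_highest_priority_user
-- ===== SOURCE A (Python) =====
-- def get_highest_priority_user(waitlist):
--     """Helper function to find the user with the highest priority and earliest timestamp."""
--     if not waitlist:
--         return None  # Return None if the waitlist is empty
--
--     highest_priority_user = waitlist[0]
--     for user in waitlist:
--         if user[0] > highest_priority_user[0]:  # Compare priorities
--             highest_priority_user = user
--         elif user[0] == highest_priority_user[0]:  # Resolve ties by timestamp
--             if user[1] < highest_priority_user[1]:
--                 highest_priority_user = user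
--     return highest_priority_user
-- ===== SOURCE B (Python) =====
-- def get_highest_priority_user(waitlist):
--     """Find the user with the highest priority and earliest timestamp."""
--     if not waitlist:
--         return None
--     return sorted(waitlist, key=lambda u: (-u[0], u[1]))[0]
-- ===== Notes on version B (the rewrite author's own statement) =====
-- stated objective: simpler
-- what changed: Replaces A's manual single-pass argmax loop with sort-by-(-priority, timestamp)-then-take-first; stable sort preserves A's first-occurrence tie-breaking.
import Mathlib
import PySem

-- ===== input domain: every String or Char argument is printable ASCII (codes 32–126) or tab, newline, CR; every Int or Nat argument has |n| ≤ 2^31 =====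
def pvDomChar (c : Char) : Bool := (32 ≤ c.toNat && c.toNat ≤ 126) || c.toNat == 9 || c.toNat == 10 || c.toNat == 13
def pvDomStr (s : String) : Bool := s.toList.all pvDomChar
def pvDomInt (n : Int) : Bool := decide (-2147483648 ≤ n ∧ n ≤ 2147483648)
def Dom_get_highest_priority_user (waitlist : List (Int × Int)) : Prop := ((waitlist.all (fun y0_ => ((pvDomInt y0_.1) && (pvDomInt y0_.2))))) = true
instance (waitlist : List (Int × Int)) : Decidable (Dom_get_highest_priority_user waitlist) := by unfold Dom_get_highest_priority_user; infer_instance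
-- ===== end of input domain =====

-- B replaces A's manual argmax loop with sort-by-(-priority, timestamp) then take the first element (simpler, not faster).

-- ===== PORT A =====
def get_highest_priority_user (waitlist : List (Int × Int)) : Option (Int × Int) :=
  match waitlist with
  | [] => none
  | h :: _ =>
    some (waitlist.foldl (fun best user =>
      if user.1 > best.1 then user
      else if user.1 = best.1 then (if user.2 < best.2 then user else best)
      else best) h)

-- ===== PORT B =====
def get_highest_priority_user_alt (waitlist : List (Int × Int)) : Option (Int × Int) :=
  match waitlist with
  | [] => none
  | _ :: _ =>
    (PySem.List.sorted2 waitlist (fun u => -u.1) (fun u => u.2) false).head?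

-- ===== PRECONDITION & SPEC =====
def Spec_get_highest_priority_user (waitlist : List (Int × Int)) (out : Option (Int × Int)) : Prop := out = get_highest_priority_user_alt waitlist
instance (waitlist : List (Int × Int)) (out : Option (Int × Int)) : Decidable (Spec_get_highest_priority_user waitlist out) := by unfold Spec_get_highest_priority_user; infer_instance

-- ===== CLAIM (what is proved, stated in full; the proofs are below) =====
def Claim_equal_get_highest_priority_user : Prop := ∀ (waitlist : List (Int × Int)), Dom_get_highest_priority_user waitlist → Spec_get_highest_priority_user waitlist (get_highest_priority_user waitlist)

-- ===== LEMMAS AND PROOFS =====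

-- the strict "comes before" test that sorted2 uses for key (-p, t)
def pvLt2 (u v : Int × Int) : Bool :=
  decide ((-u.1) < (-v.1)) || (!decide ((-v.1) < (-u.1)) && decide (u.2 < v.2))

-- one insertion step seen through head?
theorem pvHead_insertBy (bf : Int × Int → Int × Int → Bool) (x : Int × Int) (ys : List (Int × Int)) :
    (PySem.List.insertBy bf x ys).head? =
      some (match ys with | [] => x | y :: _ => if bf x y then x else y) := by
  cases ys with
  | nil => simp [PySem.List.insertBy]
  | cons y ys' =>
    by_cases h : bf x y <;> simp [PySem.List.insertBy, h]

-- the head of the insertion-sort fold is a running first-min fold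
theorem pvHead_foldl_insertBy (bf : Int × Int → Int × Int → Bool)
    (xs : List (Int × Int)) (acc : List (Int × Int)) :
    (List.foldl (fun a x => PySem.List.insertBy bf x a) acc xs).head? =
      List.foldl (fun (o : Option (Int × Int)) x =>
        some (match o with | none => x | some m => if bf x m then x else m)) acc.head? xs := by
  induction xs generalizing acc with
  | nil => rfl
  | cons x xs ih =>
    simp only [List.foldl]
    rw [ih, pvHead_insertBy]
    cases acc <;> rfl

-- A's branch cascade is exactly "replace if pvLt2 u best"
theorem pvStep_eq (b u : Int × Int) :
    (if u.1 > b.1 then u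
     else if u.1 = b.1 then (if u.2 < b.2 then u else b)
     else b) = (if pvLt2 u b then u else b) := by
  rcases b with ⟨bp, bt⟩
  rcases u with ⟨up, ut⟩
  simp only [pvLt2]
  split_ifs with h1 h2 h3 h4 h5 <;> simp_all <;> omega

-- the option-valued running min on (some b) is A's fold on b
theorem pvFold_some (t : List (Int × Int)) (b : Int × Int) :
    List.foldl (fun (o : Option (Int × Int)) x =>
        some (match o with | none => x | some m => if pvLt2 x m then x else m)) (some b) t =
      some (List.foldl (fun best user =>
        if user.1 > best.1 then user
        else if user.1 = best.1 then (if user.2 < best.2 then user else best)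
        else best) b t) := by
  induction t generalizing b with
  | nil => rfl
  | cons x xs ih =>
    simp only [List.foldl]
    rw [ih, pvStep_eq]

-- ===== VERDICT (by name: the statement is the Claim_ definition above) =====
theorem get_highest_priority_user_spec : Claim_equal_get_highest_priority_user := by
  unfold Claim_equal_get_highest_priority_user
  intro waitlist _
  unfold Spec_get_highest_priority_user
  cases waitlist with
  | nil => rfl
  | cons h t =>
    simp only [get_highest_priority_user, get_highest_priority_user_alt, PySem.List.sorted2]
    rw [pvHead_foldl_insertBy]
    have hbf : (if false = true
          then (fun a b : Int × Int => decide ((-b.1) < (-a.1)) || (!decide ((-a.1) < (-b.1)) && decide (b.2 < a.2)))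
          else fun a b : Int × Int => decide ((-a.1) < (-b.1)) || (!decide ((-b.1) < (-a.1)) && decide (a.2 < b.2)))
        = pvLt2 := rfl
    rw [hbf]
    simp only [List.head?, List.foldl]
    rw [pvFold_some]
    have hinit : (if h.1 > h.1 then h else if True then (if h.2 < h.2 then h else h) else h) = h := by
      split_ifs <;> rfl
    rw [hinit]
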